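-- pv_equiv track=rewrite | github.com/daniel-reich/ubiquitous-fiesta | 4xZFisQX8NnYB3nv4_12.py | maximum_seating
-- ===== SOURCE A (Python) =====
-- def maximum_seating(lst):
--     w=''.join([str(i) for i in lst]).split('1')
--     if w[0]=='' and  w[-1]=='':
--         return sum([(len(i)-2)//3 for i in w[1:-1] if len(i)>2])
--     elif w[0]=='':
--         return sum([(len(i)-2)//3 for i in w[1:-1] if len(i)>2])+(len(w[-1])//3)
--     elif w[-1]=='':
--         return sum([(len(i)-2)//3 for i in w[1:-1] if len(i)>2])+(len(w[0])//3)
--     else: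
--         if len(w)>=2:
--             return sum([(len(i)-2)//3 for i in w[1:-1] if len(i)>2])+(len(w[0])//3)+(len(w[-1])//3)
--         else:
--             return (len(w[0])-1)//3 +1
-- ===== SOURCE B (Python) =====
-- def maximum_seating(lst):
--     # single left-to-right scan over the joined string, tracking the current
--     # run of non-'1' characters and whether it touches the left boundary
--     s = ''.join(str(i) for i in lst)
--     total = 0
--     run = 0
--     no_one_yet = True  # True while no '1' has been seen: current run touches index 0
--     for c in s:
--         if c == '1':
--             if run:
--                 total += run // 3 if no_one_yet else ((run - 2) // 3 if run > 2 else 0)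
--             run = 0
--             no_one_yet = False
--         else:
--             run += 1
--     if run:
--         total += (run - 1) // 3 + 1 if no_one_yet else run // 3
--     return total
-- ===== Notes on version B (the rewrite author's own statement) =====
-- stated objective: alternative
-- what changed: Replaces split('1') plus slicing/summing over the pieces list and a four-way branch on first/last piece with a single character scan of the joined string that keeps only the current run length and a left-boundary flag.
import Mathlib
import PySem

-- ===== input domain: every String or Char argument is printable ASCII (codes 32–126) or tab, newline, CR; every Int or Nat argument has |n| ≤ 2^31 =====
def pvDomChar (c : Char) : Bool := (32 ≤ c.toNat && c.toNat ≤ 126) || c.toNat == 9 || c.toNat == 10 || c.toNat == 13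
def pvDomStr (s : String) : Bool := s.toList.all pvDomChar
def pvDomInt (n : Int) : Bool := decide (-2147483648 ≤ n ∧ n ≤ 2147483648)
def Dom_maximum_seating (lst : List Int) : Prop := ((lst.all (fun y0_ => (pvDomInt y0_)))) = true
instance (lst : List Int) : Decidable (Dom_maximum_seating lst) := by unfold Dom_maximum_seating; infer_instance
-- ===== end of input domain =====

-- B replaces A's split('1')-and-branch-on-pieces computation by a single scan over the
-- joined string keeping a run length and a left-boundary flag (objective: alternative).

-- ===== PORT A =====
-- sum([(len(i)-2)//3 for i in w[1:-1] if len(i)>2])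
def pvInner (w : List (List Char)) : Int :=
  (((PySem.List.slice w (some 1) (some (-1))).filter (fun i => decide (2 < i.length))).map
    (fun i => PySem.Int.floordiv ((i.length : Int) - 2) 3)).sum

-- the branch cascade of A, on the already-computed piece list w
def pvBranch (w : List (List Char)) : Int :=
  let w0 := (PySem.List.pyGet? w 0).getD []       -- w[0]; w is never empty (split returns ≥ 1 piece), so no IndexError
  let wl := (PySem.List.pyGet? w (-1)).getD []    -- w[-1]; same
  if w0 = [] ∧ wl = [] then pvInner w
  else if w0 = [] then pvInner w + PySem.Int.floordiv (wl.length : Int) 3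
  else if wl = [] then pvInner w + PySem.Int.floordiv (w0.length : Int) 3
  else if 2 ≤ w.length then
    pvInner w + PySem.Int.floordiv (w0.length : Int) 3 + PySem.Int.floordiv (wl.length : Int) 3
  else PySem.Int.floordiv ((w0.length : Int) - 1) 3 + 1

def maximum_seating (lst : List Int) : Int :=
  pvBranch (PySem.Chars.splitOn (PySem.Chars.join [] (lst.map PySem.Int.toChars)) ['1'])

-- ===== PORT B =====
-- the for-loop of Source B: state (total, run, no_one_yet)
def pvLoop : List Char → Int → Int → Bool → Int
  | [], total, run, noOne =>
      if run ≠ 0 then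
        total + (if noOne then PySem.Int.floordiv (run - 1) 3 + 1 else PySem.Int.floordiv run 3)
      else total
  | ch :: cs, total, run, noOne =>
      if ch = '1' then
        pvLoop cs
          (if run ≠ 0 then
             total + (if noOne then PySem.Int.floordiv run 3
                      else if 2 < run then PySem.Int.floordiv (run - 2) 3 else 0)
           else total)
          0 false
      else pvLoop cs total (run + 1) noOne

def maximum_seating_alt (lst : List Int) : Int :=
  pvLoop (PySem.Chars.join [] (lst.map PySem.Int.toChars)) 0 0 true

-- ===== PRECONDITION & SPEC =====
def Spec_maximum_seating (lst : List Int) (out : Int) : Prop := out = maximum_seating_alt lst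
instance (lst : List Int) (out : Int) : Decidable (Spec_maximum_seating lst out) := by unfold Spec_maximum_seating; infer_instance

-- ===== CLAIM (what is proved, stated in full; the proofs are below) =====
def Claim_equal_maximum_seating : Prop := ∀ (lst : List Int), Dom_maximum_seating lst → Spec_maximum_seating lst (maximum_seating lst)

-- ===== LEMMAS AND PROOFS =====

-- simple structural recursion computing s.split('1') on char lists
def pvSplit1 : List Char → List (List Char)
  | [] => [[]]
  | c :: cs =>
      if c = '1' then [] :: pvSplit1 cs
      else match pvSplit1 cs with
        | [] => [[c]]
        | p :: ps => (c :: p) :: ps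

theorem pvSplit1_ne_nil : ∀ cs, pvSplit1 cs ≠ []
  | [] => by simp [pvSplit1]
  | c :: cs => by
      unfold pvSplit1
      split
      · simp
      · cases h : pvSplit1 cs <;> simp

theorem pvGo : ∀ (fuel : Nat) (l cur : List Char) (acc : List (List Char))
    (p : List Char) (ps : List (List Char)),
    pvSplit1 l = p :: ps → l.length < fuel →
    PySem.Chars.splitOn.go ['1'] fuel l cur acc = acc.reverse ++ (cur.reverse ++ p) :: ps := by
  intro fuel
  induction fuel with
  | zero => intro l cur acc p ps _ h; omega
  | succ fuel ih =>
    intro l cur acc p ps hsplit hlen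
    cases l with
    | nil =>
      simp [pvSplit1] at hsplit
      obtain ⟨hp, hps⟩ := hsplit
      subst hp; subst hps
      simp [PySem.Chars.splitOn.go]
    | cons c rest =>
      by_cases hc : c = '1'
      · subst hc
        simp only [pvSplit1] at hsplit
        obtain ⟨q, qs, hq⟩ : ∃ q qs, pvSplit1 rest = q :: qs := by
          cases h : pvSplit1 rest with
          | nil => exact absurd h (pvSplit1_ne_nil rest)
          | cons q qs => exact ⟨q, qs, rfl⟩
        rw [hq] at hsplit
        obtain ⟨hp, hps⟩ := List.cons_eq_cons.mp hsplit.symm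
        simp only [PySem.Chars.splitOn.go, List.isPrefixOf]
        simp only [beq_self_eq_true, Bool.true_and, if_pos,
          List.length_cons, List.length_nil, List.drop_succ_cons, List.drop_zero]
        rw [ih rest [] (cur.reverse :: acc) q qs hq (by simp at hlen ⊢; omega)]
        subst hp; subst hps; simp
      · have hq : ∃ q qs, pvSplit1 rest = q :: qs := by
          cases h : pvSplit1 rest with
          | nil => exact absurd h (pvSplit1_ne_nil rest)
          | cons q qs => exact ⟨q, qs, rfl⟩
        obtain ⟨q, qs, hq⟩ := hq
        simp only [pvSplit1, if_neg hc, hq] at hsplit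
        obtain ⟨hp, hps⟩ := List.cons_eq_cons.mp hsplit.symm
        simp only [PySem.Chars.splitOn.go, List.isPrefixOf, Bool.and_true]
        rw [if_neg (by simp [Ne.symm hc])]
        rw [ih rest (c :: cur) acc q qs hq (by simp at hlen ⊢; omega)]
        subst hp; subst hps; simp

theorem pvSplitOn_eq (cs : List Char) : PySem.Chars.splitOn cs ['1'] = pvSplit1 cs := by
  obtain ⟨p, ps, hp⟩ : ∃ p ps, pvSplit1 cs = p :: ps := by
    cases h : pvSplit1 cs with
    | nil => exact absurd h (pvSplit1_ne_nil cs)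
    | cons p ps => exact ⟨p, ps, rfl⟩
  unfold PySem.Chars.splitOn
  rw [pvGo (cs.length + 1) cs [] [] p ps hp (by omega)]
  simp [hp]

-- contribution of a run of length `run` ending at the right boundary / at a '1'
def pvLastC (run : Int) (noOne : Bool) : Int :=
  if run ≠ 0 then
    (if noOne then PySem.Int.floordiv (run - 1) 3 + 1 else PySem.Int.floordiv run 3)
  else 0

def pvMidC (run : Int) (noOne : Bool) : Int :=
  if run ≠ 0 then
    (if noOne then PySem.Int.floordiv run 3
     else if 2 < run then PySem.Int.floordiv (run - 2) 3 else 0)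
  else 0

-- what pvLoop adds, expressed over the piece list
def pvComb : Int → Bool → List (List Char) → Int
  | _, _, [] => 0
  | run, noOne, [p] => pvLastC (run + p.length) noOne
  | run, noOne, p :: q :: rest => pvMidC (run + p.length) noOne + pvComb 0 false (q :: rest)

theorem pvComb_cons (run : Int) (noOne : Bool) (p : List Char) (rest : List (List Char))
    (h : rest ≠ []) :
    pvComb run noOne (p :: rest) = pvMidC (run + p.length) noOne + pvComb 0 false rest := by
  cases rest with
  | nil => exact absurd rfl h
  | cons q qs => rfl

theorem pvLoop_eq : ∀ (cs : List Char) (total : Int) (n : Nat) (noOne : Bool),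
    pvLoop cs total (n : Int) noOne = total + pvComb (n : Int) noOne (pvSplit1 cs) := by
  intro cs
  induction cs with
  | nil =>
    intro total n noOne
    simp only [pvLoop, pvSplit1, pvComb, pvLastC, List.length_nil, Nat.cast_zero, add_zero]
    split_ifs <;> simp
  | cons c cs ih =>
    intro total n noOne
    obtain ⟨q, qs, hq⟩ : ∃ q qs, pvSplit1 cs = q :: qs := by
      cases h : pvSplit1 cs with
      | nil => exact absurd h (pvSplit1_ne_nil cs)
      | cons q qs => exact ⟨q, qs, rfl⟩
    by_cases hc : c = '1'
    · subst hc
      have h0 : ∀ t : Int, pvLoop cs t 0 false = t + pvComb 0 false (pvSplit1 cs) := by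
        intro t
        have := ih t 0 false
        rwa [Nat.cast_zero] at this
      simp only [pvLoop, if_true]
      rw [h0]
      simp only [pvSplit1, if_true, hq]
      rw [pvComb_cons (n : Int) noOne [] (q :: qs) (by simp)]
      rw [← hq]
      simp only [pvMidC, List.length_nil, Nat.cast_zero, add_zero]
      split_ifs <;> ring
    · simp only [pvLoop, if_neg hc]
      have h1 := ih total (n + 1) noOne
      rw [show (((n : Nat) + 1 : Nat) : Int) = (n : Int) + 1 by push_cast [List.length_cons]; ring] at h1
      rw [h1]
      simp only [pvSplit1, if_neg hc, hq]
      cases qs with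
      | nil =>
        simp only [pvComb]
        rw [show ((n : Int) + 1) + ((q.length : Nat) : Int)
              = (n : Int) + ((((c :: q).length : Nat)) : Int) by push_cast [List.length_cons]; ring]
      | cons q2 rest =>
        simp only [pvComb]
        rw [show ((n : Int) + 1) + ((q.length : Nat) : Int)
              = (n : Int) + ((((c :: q).length : Nat)) : Int) by push_cast [List.length_cons]; ring]

-- the interior sum of A equals the sum of pvMidC over the middle pieces
theorem pvMidC_false (l : Nat) :
    pvMidC (l : Int) false = if 2 < l then PySem.Int.floordiv ((l : Int) - 2) 3 else 0 := by
  simp only [pvMidC, Bool.false_eq_true, if_false]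
  split_ifs <;> first | rfl | omega

theorem pvComb_mid : ∀ (mid : List (List Char)) (q : List Char),
    pvComb 0 false (mid ++ [q]) =
      ((mid.filter (fun i => decide (2 < i.length))).map
        (fun i => PySem.Int.floordiv ((i.length : Int) - 2) 3)).sum
      + pvLastC (q.length : Int) false := by
  intro mid
  induction mid with
  | nil => intro q; simp [pvComb]
  | cons m mid ih =>
    intro q
    rw [List.cons_append, pvComb_cons _ _ _ _ (by simp), ih q]
    rw [show ((0 : Int) + m.length) = ((m.length : Nat) : Int) by simp, pvMidC_false]
    by_cases hm : 2 < m.length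
    · simp [hm]; ring
    · simp [hm]

-- A's branch cascade equals pvComb 0 true on any nonempty piece list
theorem pvBranch_eq (p : List Char) (ps : List (List Char)) :
    pvBranch (p :: ps) = pvComb 0 true (p :: ps) := by
  rcases List.eq_nil_or_concat ps with h | ⟨mid, q, h⟩
  · subst h
    simp only [pvBranch, pvInner, pvComb, pvLastC]
    by_cases hp : p = []
    · subst hp
      simp [PySem.List.pyGet?, PySem.List.pyIdx?, PySem.List.slice]
    · have h1 : (PySem.List.pyGet? [p] (0 : Int)).getD [] = p := by
        simp [PySem.List.pyGet?, PySem.List.pyIdx?]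
      have h2 : (PySem.List.pyGet? [p] (-1 : Int)).getD [] = p := by
        simp [PySem.List.pyGet?, PySem.List.pyIdx?]
      simp only [h1, h2]
      simp [hp]
  · subst h
    simp only [List.concat_eq_append]
    have hget0 : (PySem.List.pyGet? (p :: (mid ++ [q])) (0 : Int)).getD [] = p := by
      show (PySem.List.pyGet? ((p :: mid) ++ [q]) (0 : Int)).getD [] = p
      simp [PySem.List.pyGet?, PySem.List.pyIdx?,
        show (0 : Int) ≤ (mid.length : Int) + 1 by positivity]
    have hgetl : (PySem.List.pyGet? (p :: (mid ++ [q])) (-1 : Int)).getD [] = q := by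
      show (PySem.List.pyGet? ((p :: mid) ++ [q]) (-1 : Int)).getD [] = q
      simp [PySem.List.pyGet?, PySem.List.pyIdx?]
    have hslice : PySem.List.slice (p :: (mid ++ [q])) (some 1) (some (-1)) = mid := by
      show PySem.List.slice ((p :: mid) ++ [q]) (some 1) (some (-1)) = mid
      simp [PySem.List.slice]
    rw [pvComb_cons _ _ _ _ (by simp), pvComb_mid mid q]
    simp only [pvBranch, pvInner, hget0, hgetl, hslice]
    have hmp : pvMidC (0 + (p.length : Int)) true =
        if p = [] then 0 else PySem.Int.floordiv (p.length : Int) 3 := by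
      by_cases hpn : p = []
      · simp [pvMidC, hpn]
      · have hplen : p.length ≠ 0 := by simpa [List.length_eq_zero_iff] using hpn
        simp [pvMidC, hpn, hplen]
    have hlq : pvLastC ((q.length : Int)) false =
        if q = [] then 0 else PySem.Int.floordiv (q.length : Int) 3 := by
      by_cases hqn : q = []
      · simp [pvLastC, hqn]
      · have hqlen : q.length ≠ 0 := by simpa [List.length_eq_zero_iff] using hqn
        simp [pvLastC, hqn, hqlen]
    rw [hmp, hlq]
    by_cases hp : p = [] <;> by_cases hqn : q = [] <;>
      simp [hp, hqn] <;> ring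

-- ===== VERDICT (by name: the statement is the Claim_ definition above) =====
theorem maximum_seating_spec : Claim_equal_maximum_seating := by
  intro lst _
  unfold Spec_maximum_seating maximum_seating maximum_seating_alt
  set cs := PySem.Chars.join [] (lst.map PySem.Int.toChars) with hcs
  obtain ⟨p, ps, hp⟩ : ∃ p ps, pvSplit1 cs = p :: ps := by
    cases h : pvSplit1 cs with
    | nil => exact absurd h (pvSplit1_ne_nil cs)
    | cons p ps => exact ⟨p, ps, rfl⟩
  rw [pvSplitOn_eq, hp, pvBranch_eq]
  have h := pvLoop_eq cs 0 0 true
  rw [Nat.cast_zero] at h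
  rw [h, hp, zero_add]
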